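-- pv_equiv track=rewrite | github.com/QitaoXu/Lintcode | interviews/Mathworks/mergeString.py | mergeString
-- ===== SOURCE A (Python) =====
-- def mergeString(string1, string2):
--
--     isString1 = True
--
--     i, j = 0, 0
--
--     string = ""
--
--     while i < len(string1) and j < len(string2):
--
--         if isString1:
--
--             string += string1[i]
--             i += 1
--
--             isString1 = not isString1
--
--         else:
--             string += string2[j]
--             j += 1
--
--             isString1 = not isString1
--
--     if i < len(string1):
--         string += string1[i:]
--
--     if j < len(string2):
--         string += string2[j:]
--
--     return string
-- ===== SOURCE B (Python) =====
-- def mergeString(string1, string2):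
--     n = min(len(string1), len(string2))
--     return ''.join(c1 + c2 for c1, c2 in zip(string1, string2)) + string1[n:] + string2[n:]
-- ===== Notes on version B (the rewrite author's own statement) =====
-- stated objective: idiomatic
-- what changed: Replaced the toggle-flag while loop over two indices with a zip over character pairs joined at once plus the two slice remainders appended afterwards.
import Mathlib
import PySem

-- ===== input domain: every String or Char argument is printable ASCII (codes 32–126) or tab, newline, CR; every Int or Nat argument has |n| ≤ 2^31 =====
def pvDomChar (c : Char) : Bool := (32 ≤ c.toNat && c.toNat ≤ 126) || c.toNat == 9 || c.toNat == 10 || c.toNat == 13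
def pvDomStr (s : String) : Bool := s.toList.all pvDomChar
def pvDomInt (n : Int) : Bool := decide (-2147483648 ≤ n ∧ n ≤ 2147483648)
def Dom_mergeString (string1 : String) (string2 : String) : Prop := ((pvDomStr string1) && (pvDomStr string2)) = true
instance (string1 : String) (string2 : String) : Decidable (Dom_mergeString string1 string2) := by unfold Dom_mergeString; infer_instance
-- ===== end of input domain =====

-- B replaces A's toggle-flag while loop over two indices by a zip over pairs
-- plus slice remainders (idiomatic; return value only, no side effects).

-- ===== PORT A =====
-- A's while loop: indices i, j, the toggle flag, and the accumulated string;
-- at loop exit the two tail appends (string1[i:], string2[j:]) are performed,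
-- with a `drop` past the end being empty exactly as the Python guards ensure.
def mergeStringLoop (l1 l2 : List Char) (i j : Nat) (isString1 : Bool)
    (acc : List Char) : List Char :=
  if h : i < l1.length ∧ j < l2.length then
    if isString1 then
      mergeStringLoop l1 l2 (i + 1) j false (acc ++ [l1[i]'h.1])
    else
      mergeStringLoop l1 l2 i (j + 1) true (acc ++ [l2[j]'h.2])
  else
    acc ++ l1.drop i ++ l2.drop j
termination_by (l1.length - i) + (l2.length - j)
decreasing_by all_goals omega

def mergeString (string1 : String) (string2 : String) : String :=
  String.mk (mergeStringLoop string1.toList string2.toList 0 0 true [])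

-- ===== PORT B =====
def mergeString_alt (string1 : String) (string2 : String) : String :=
  let l1 := string1.toList
  let l2 := string2.toList
  let n := min l1.length l2.length
  String.mk ((l1.zip l2).flatMap (fun p => [p.1, p.2]) ++ l1.drop n ++ l2.drop n)

-- ===== PRECONDITION & SPEC =====
def Spec_mergeString (string1 : String) (string2 : String) (out : String) : Prop := out = mergeString_alt string1 string2
instance (string1 : String) (string2 : String) (out : String) : Decidable (Spec_mergeString string1 string2 out) := by unfold Spec_mergeString; infer_instance

-- ===== CLAIM (what is proved, stated in full; the proofs are below) =====
def Claim_equal_mergeString : Prop := ∀ (string1 : String) (string2 : String), Dom_mergeString string1 string2 → Spec_mergeString string1 string2 (mergeString string1 string2)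

-- ===== LEMMAS AND PROOFS =====

-- Reference interleaving of two character lists.
def pvInter : List Char → List Char → List Char
  | [], b => b
  | a, [] => a
  | a :: as, b :: bs => a :: b :: pvInter as bs

-- Variant for the flag-false state: the next character comes from the second list.
def pvInter2 : List Char → List Char → List Char
  | [], b => b
  | a, [] => a
  | a, b :: bs => b :: pvInter a bs

lemma pvInter2_cons (as : List Char) (b : Char) (bs : List Char) :
    pvInter2 as (b :: bs) = b :: pvInter as bs := by
  cases as <;> rfl

-- When either side is exhausted, interleaving degenerates to concatenation.
lemma pvInter_append_of_nil (a b : List Char) (h : a = [] ∨ b = []) :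
    pvInter a b = a ++ b := by
  rcases h with rfl | rfl
  · cases b <;> simp [pvInter]
  · cases a <;> simp [pvInter]

lemma pvInter2_append_of_nil (a b : List Char) (h : a = [] ∨ b = []) :
    pvInter2 a b = a ++ b := by
  rcases h with rfl | rfl
  · cases b <;> simp [pvInter2]
  · cases a <;> simp [pvInter2]

-- Both loop states computed in one strong induction on the remaining work.
lemma mergeStringLoop_eq (k : Nat) :
    ∀ (l1 l2 : List Char) (i j : Nat) (acc : List Char),
      (l1.length - i) + (l2.length - j) ≤ k →
      (mergeStringLoop l1 l2 i j true acc
          = acc ++ pvInter (l1.drop i) (l2.drop j)) ∧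
      (mergeStringLoop l1 l2 i j false acc
          = acc ++ pvInter2 (l1.drop i) (l2.drop j)) := by
  induction k with
  | zero =>
    intro l1 l2 i j acc hk
    have h1 : ¬ (i < l1.length ∧ j < l2.length) := by omega
    have d1 : l1.drop i = [] ∨ l2.drop j = [] := by
      rcases not_and_or.mp h1 with h | h
      · left; exact List.drop_eq_nil_of_le (by omega)
      · right; exact List.drop_eq_nil_of_le (by omega)
    rw [mergeStringLoop, mergeStringLoop, dif_neg h1, dif_neg h1,
      pvInter_append_of_nil _ _ d1, pvInter2_append_of_nil _ _ d1]
    simp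
  | succ k ih =>
    intro l1 l2 i j acc hk
    by_cases h : i < l1.length ∧ j < l2.length
    · obtain ⟨h1, h2⟩ := h
      have e1 : l1.drop i = l1[i] :: l1.drop (i + 1) := List.drop_eq_getElem_cons h1
      have e2 : l2.drop j = l2[j] :: l2.drop (j + 1) := List.drop_eq_getElem_cons h2
      constructor
      · rw [mergeStringLoop, dif_pos ⟨h1, h2⟩, if_pos rfl]
        have := (ih l1 l2 (i + 1) j (acc ++ [l1[i]]) (by omega)).2
        rw [this, e1, e2]
        rw [pvInter2_cons (l1.drop (i+1)) l2[j] (l2.drop (j+1))]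
        simp [pvInter]
      · rw [mergeStringLoop, dif_pos ⟨h1, h2⟩]
        simp only [Bool.false_eq_true, if_false]
        have := (ih l1 l2 i (j + 1) (acc ++ [l2[j]]) (by omega)).1
        rw [this, e2]
        rw [pvInter2_cons (l1.drop i) l2[j] (l2.drop (j+1))]
        simp
    · have d1 : l1.drop i = [] ∨ l2.drop j = [] := by
        rcases not_and_or.mp h with h' | h'
        · left; exact List.drop_eq_nil_of_le (by omega)
        · right; exact List.drop_eq_nil_of_le (by omega)
      rw [mergeStringLoop, mergeStringLoop, dif_neg h, dif_neg h,
        pvInter_append_of_nil _ _ d1, pvInter2_append_of_nil _ _ d1]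
      simp

-- B's zip-plus-remainders expression equals the reference interleaving.
lemma pvInter_eq_zip :
    ∀ (a b : List Char),
      (a.zip b).flatMap (fun p => [p.1, p.2])
          ++ a.drop (min a.length b.length) ++ b.drop (min a.length b.length)
        = pvInter a b := by
  intro a
  induction a with
  | nil => intro b; simp [pvInter]
  | cons x xs ih =>
    intro b
    cases b with
    | nil => simp [pvInter]
    | cons y ys =>
      simp only [List.zip_cons_cons, List.flatMap_cons, List.length_cons]
      have : min (xs.length + 1) (ys.length + 1) = min xs.length ys.length + 1 := by omega
      rw [this]
      simp [pvInter, ← ih ys]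

-- ===== VERDICT (by name: the statement is the Claim_ definition above) =====
theorem mergeString_spec : Claim_equal_mergeString := by
  intro string1 string2 _
  unfold Spec_mergeString mergeString mergeString_alt
  have h := (mergeStringLoop_eq ((string1.toList.length - 0) + (string2.toList.length - 0))
      string1.toList string2.toList 0 0 [] (le_refl _)).1
  rw [h, List.nil_append, List.drop_zero, List.drop_zero,
    ← pvInter_eq_zip string1.toList string2.toList]
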